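-- pv_equiv track=rewrite | github.com/SkyLanKarl/DouDiZhu | DouDiZhu.py | isDualShunZi
-- ===== SOURCE A (Python) =====
-- def isDualShunZi(nums):
--     vaild = True
--     List1 = list(nums)
--     if int(len(List1)) >= 6 and int(len(List1)) % 2 == 0:
--         for i in range(0, len(List1) - 1, 2):
--             if List1[i] != List1[i + 1]:
--                 vaild = False
--                 break
--     else:
--         vaild = False
--     return vaild
-- ===== SOURCE B (Python) =====
-- def isDualShunZi(nums):
--     L = list(nums)
--     half = L[0::2]
--     rebuilt = [x for p in half for x in (p, p)]
--     return len(L) >= 6 and len(L) % 2 == 0 and rebuilt == L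
-- ===== Notes on version B (the rewrite author's own statement) =====
-- stated objective: alternative
-- what changed: Instead of A's indexed pair-by-pair scan with a flag and break, B takes the even-position slice L[0::2], rebuilds a candidate list by duplicating each of its elements, and compares the rebuilt list with the input wholesale (build-and-compare instead of scan-and-break).
import Mathlib
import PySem

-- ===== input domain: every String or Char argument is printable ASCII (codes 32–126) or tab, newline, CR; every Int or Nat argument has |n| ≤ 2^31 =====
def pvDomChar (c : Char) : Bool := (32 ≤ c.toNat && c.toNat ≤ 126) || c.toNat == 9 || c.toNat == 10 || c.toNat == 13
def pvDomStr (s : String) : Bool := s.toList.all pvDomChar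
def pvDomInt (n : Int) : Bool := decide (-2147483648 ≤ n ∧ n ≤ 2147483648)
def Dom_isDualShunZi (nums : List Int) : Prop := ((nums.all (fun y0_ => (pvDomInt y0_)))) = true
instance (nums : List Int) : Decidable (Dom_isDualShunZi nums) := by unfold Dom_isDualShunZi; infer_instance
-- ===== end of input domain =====

-- B replaces A's scan-and-break pair check by build-and-compare: duplicate each element of the
-- even-position slice L[0::2] and compare the rebuilt list with the input (alternative; same O(n)).

-- ===== PORT A =====
-- the 'for i in range(0, len(List1)-1, 2): if List1[i] != List1[i+1]: vaild = False; break' loop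
def isDualShunZiLoopA (L : List Int) : List Int → Bool
  | [] => true
  | i :: rest =>
    if PySem.List.pyGet? L i ≠ PySem.List.pyGet? L (i + 1) then false
    else isDualShunZiLoopA L rest

def isDualShunZi (nums : List Int) : Bool :=
  let L := nums
  if decide (6 ≤ (L.length : Int)) && ((L.length : Int) % 2 == 0) then
    isDualShunZiLoopA L (PySem.List.pyRange 0 ((L.length : Int) - 1) 2)
  else false

-- ===== PORT B =====
def isDualShunZi_alt (nums : List Int) : Bool :=
  let L := nums
  -- half = L[0::2]; the step literal is 2 ≠ 0, so slice? is always 'some' (getD never fires)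
  let half := (PySem.List.slice? L (some 0) none 2).getD []
  -- rebuilt = [x for p in half for x in (p, p)]
  let rebuilt := half.flatMap (fun p => [p, p])
  decide (6 ≤ L.length) && (L.length % 2 == 0) && (rebuilt == L)

-- ===== PRECONDITION & SPEC =====
def Spec_isDualShunZi (nums : List Int) (out : Bool) : Prop := out = isDualShunZi_alt nums
instance (nums : List Int) (out : Bool) : Decidable (Spec_isDualShunZi nums out) := by unfold Spec_isDualShunZi; infer_instance

-- ===== CLAIM (what is proved, stated in full; the proofs are below) =====
def Claim_equal_isDualShunZi : Prop := ∀ (nums : List Int), Dom_isDualShunZi nums → Spec_isDualShunZi nums (isDualShunZi nums)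

-- ===== LEMMAS AND PROOFS =====

-- proof-side helpers: pairwise reading of A's loop, and the even-position subsequence
def pairsEq : List Int → Bool
  | a :: b :: t => (a == b) && pairsEq t
  | _ => true

def every2 : List Int → List Int
  | [] => []
  | [a] => [a]
  | a :: _ :: t => a :: every2 t

theorem pyRange_two_eq_nil (a b : Int) (h : b ≤ a) : PySem.List.pyRange a b 2 = [] := by
  rw [PySem.List.pyRange_of_pos a b (by norm_num)]
  have : ¬ a < b := by omega
  simp [this]

theorem pyRange_two_cons (a b : Int) (h : a < b) :
    PySem.List.pyRange a b 2 = a :: PySem.List.pyRange (a + 2) b 2 := by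
  rw [PySem.List.pyRange_of_pos a b (by norm_num), PySem.List.pyRange_of_pos (a + 2) b (by norm_num)]
  by_cases h2 : a + 2 < b
  · have hc : ((b - a + 2 - 1) / 2).toNat = ((b - (a + 2) + 2 - 1) / 2).toNat + 1 := by omega
    simp only [if_pos h, if_pos h2, hc, List.range_succ_eq_map, List.map_cons, List.map_map]
    refine List.cons_eq_cons.mpr ⟨by norm_num, ?_⟩
    apply List.map_congr_left; intro k _; simp [Function.comp]; ring
  · have hc : ((b - a + 2 - 1) / 2).toNat = 1 := by omega
    simp [if_pos h, if_neg h2, hc]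

theorem loopA_eq_pairsEq (t : List Int) : ∀ (L : List Int) (j : Nat), L.drop j = t →
    (L.length - j) % 2 = 0 →
    isDualShunZiLoopA L (PySem.List.pyRange (j : Int) ((L.length : Int) - 1) 2) = pairsEq t := by
  induction t using pairsEq.induct with
  | case1 a b t ih =>
    intro L j hdrop heven
    have hj : j + 2 + t.length = L.length := by
      have := congrArg List.length hdrop
      simp [List.length_drop] at this
      omega
    have h1 : (j : Int) < (L.length : Int) - 1 := by omega
    rw [pyRange_two_cons _ _ h1]
    have ha : L[j]? = some a := by
      have := List.getElem?_drop (xs := L) (i := j) (j := 0)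
      rw [hdrop] at this; simpa using this.symm
    have hb : L[j+1]? = some b := by
      have := List.getElem?_drop (xs := L) (i := j) (j := 1)
      rw [hdrop] at this; simpa using this.symm
    have hga : PySem.List.pyGet? L (j : Int) = some a := by
      rw [PySem.List.pyGet?_natCast]; exact ha
    have hgb : PySem.List.pyGet? L ((j : Int) + 1) = some b := by
      have : ((j : Int) + 1) = ((j + 1 : Nat) : Int) := by push_cast; ring
      rw [this, PySem.List.pyGet?_natCast]; exact hb
    show isDualShunZiLoopA L _ = _
    rw [isDualShunZiLoopA, hga, hgb]
    by_cases hab : a = b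
    · have : ¬ (some a ≠ some b) := by simp [hab]
      rw [if_neg this]
      have hrec : ((j : Int) + 2) = ((j + 2 : Nat) : Int) := by push_cast; ring
      rw [hrec, ih L (j + 2) (by rw [← List.drop_drop, hdrop]; rfl) (by omega)]
      simp [pairsEq, hab]
    · have : (some a ≠ some b) := by simp [hab]
      rw [if_pos this]
      simp [pairsEq, hab]
  | case2 t ht =>
    intro L j hdrop heven
    cases t with
    | nil =>
      have hj : L.length ≤ j := by
        have := congrArg List.length hdrop
        simp [List.length_drop] at this
        omega
      rw [pyRange_two_eq_nil _ _ (by omega)]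
      rfl
    | cons x t1 =>
      cases t1 with
      | nil =>
        exfalso
        have := congrArg List.length hdrop
        simp [List.length_drop] at this
        omega
      | cons y t2 => exact absurd rfl (ht x y t2)

theorem fm_every2 (xs : List Int) :
    List.filterMap (fun (k : Nat) => xs[(2 * (k:Int)).toNat]?) (List.range ((xs.length + 1) / 2)) = every2 xs := by
  induction xs using every2.induct with
  | case1 => simp [every2]
  | case2 a => simp [every2, List.range_succ]
  | case3 a b t ih =>
    have hc : ((a :: b :: t).length + 1) / 2 = (t.length + 1) / 2 + 1 := by
      simp [List.length_cons]; omega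
    have hfun : ((fun (k : Nat) => (a :: b :: t)[(2 * (k:Int)).toNat]?) ∘ Nat.succ)
        = (fun (k : Nat) => t[(2 * (k:Int)).toNat]?) := by
      funext k
      have h1 : (2 * ((k:Int) + 1)).toNat = 2 * k + 2 := by omega
      have h2 : (2 * (k:Int)).toNat = 2 * k := by omega
      simp [Function.comp, h1, h2]
    rw [hc, List.range_succ_eq_map, List.filterMap_cons, List.filterMap_map, hfun, ih]
    norm_num [every2]

theorem slice02 (xs : List Int) :
    PySem.List.slice? xs (some 0) none 2 = some (every2 xs) := by
  rw [PySem.List.slice?]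
  have hsi : PySem.List.sliceIndices xs.length (some 0) none 2 = ((0:Int), (xs.length:Int), 2) := by
    simp [PySem.List.sliceIndices]
  norm_num [hsi]
  have hcnt : (if 0 < xs.length then (((xs.length:Int) + 2 - 1) / 2).toNat else 0)
      = (xs.length + 1) / 2 := by
    split_ifs with h
    · omega
    · omega
  rw [hcnt]
  exact fm_every2 xs

theorem pairsEq_eq_rebuild (L : List Int) (heven : L.length % 2 = 0) :
    pairsEq L = ((every2 L).flatMap (fun p => [p, p]) == L) := by
  induction L using every2.induct with
  | case1 => simp [pairsEq, every2]
  | case2 a => simp at heven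
  | case3 a b t ih =>
    have ht : t.length % 2 = 0 := by simp [List.length_cons] at heven; omega
    simp only [pairsEq, every2, List.flatMap_cons]
    rw [ih ht]
    show ((a == b) && (((every2 t).flatMap fun p => [p, p]) == t))
        = ((a :: a :: ((every2 t).flatMap fun p => [p, p])) == (a :: b :: t))
    by_cases hab : a = b
    · subst hab
      by_cases hrest : ((every2 t).flatMap fun p => [p, p]) = t
      · simp [hrest]
      · simp [hrest]
    · simp [hab]

-- ===== VERDICT (by name: the statement is the Claim_ definition above) =====
theorem isDualShunZi_spec : Claim_equal_isDualShunZi := by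
  intro nums _
  show isDualShunZi nums = isDualShunZi_alt nums
  rw [show isDualShunZi nums =
        (if (decide (6 ≤ (nums.length : Int)) && ((nums.length : Int) % 2 == 0)) then
          isDualShunZiLoopA nums (PySem.List.pyRange 0 ((nums.length : Int) - 1) 2)
        else false) from rfl,
      show isDualShunZi_alt nums =
        (decide (6 ≤ nums.length) && (nums.length % 2 == 0)
          && ((((PySem.List.slice? nums (some 0) none 2).getD []).flatMap (fun p => [p, p])) == nums))
        from rfl,
      slice02 nums]
  by_cases hlen : 6 ≤ nums.length ∧ nums.length % 2 = 0
  · have hA : (decide (6 ≤ (nums.length : Int)) && ((nums.length : Int) % 2 == 0)) = true := by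
      simp only [Bool.and_eq_true, decide_eq_true_eq, beq_iff_eq]
      omega
    have hB1 : decide (6 ≤ nums.length) = true := by simp [hlen.1]
    have hB2 : (nums.length % 2 == 0) = true := by simp [hlen.2]
    rw [hA, hB1, hB2]
    simp only [if_true, Bool.true_and]
    have hloop := loopA_eq_pairsEq nums nums 0 (by simp) (by omega)
    rw [show ((0:Nat):Int) = (0:Int) from rfl] at hloop
    rw [hloop, pairsEq_eq_rebuild nums hlen.2]
    rfl
  · have hA : (decide (6 ≤ (nums.length : Int)) && ((nums.length : Int) % 2 == 0)) = false := by
      simp only [Bool.and_eq_false_iff, decide_eq_false_iff_not, beq_eq_false_iff_ne, ne_eq]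
      omega
    have hB : (decide (6 ≤ nums.length) && (nums.length % 2 == 0)) = false := by
      simp only [Bool.and_eq_false_iff, decide_eq_false_iff_not, beq_eq_false_iff_ne, ne_eq]
      omega
    rw [hA, hB]
    simp
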